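-- pv_equiv track=rewrite | github.com/branes-ai/graphs | cli/measure_efficiency.py | map_fusion_pattern_to_operation_type
-- ===== SOURCE A (Python) =====
-- def map_fusion_pattern_to_operation_type(fusion_pattern: str) -> str:
--     """Map a fusion pattern string to a calibration operation type.
--
--     This mapping determines which efficiency curve to use for estimation.
--
--     Args:
--         fusion_pattern: Fusion pattern from partitioner (e.g., "Conv2d_BatchNorm2d_ReLU")
--
--     Returns:
--         Operation type for calibration lookup
--     """
--     pattern_lower = fusion_pattern.lower()
--
--     # Depthwise convolutions (very low efficiency)
--     if 'depthwise' in pattern_lower or 'dw' in pattern_lower: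
--         return 'conv2d_depthwise'
--
--     # MBConv blocks (EfficientNet/MobileNet style)
--     if 'mbconv' in pattern_lower or 'inverted' in pattern_lower:
--         return 'mbconv'
--
--     # Standard convolutions
--     if 'conv2d' in pattern_lower or 'conv' in pattern_lower:
--         if 'batchnorm' in pattern_lower or 'bn' in pattern_lower:
--             return 'conv2d_batchnorm'
--         else:
--             return 'conv2d'
--
--     # Matrix operations
--     if 'matmul' in pattern_lower or 'linear' in pattern_lower or 'attention' in pattern_lower:
--         return 'matmul'
--
--     # Pooling operations
--     if 'pool' in pattern_lower:
--         return 'pooling'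
--
--     # Normalization
--     if 'layernorm' in pattern_lower or 'layer_norm' in pattern_lower:
--         return 'layernorm'
--     if 'batchnorm' in pattern_lower:
--         return 'batchnorm'
--
--     # Activations
--     if any(act in pattern_lower for act in ['relu', 'gelu', 'silu', 'swish', 'sigmoid']):
--         return 'activation'
--
--     # Element-wise operations
--     if 'add' in pattern_lower or 'mul' in pattern_lower or 'elementwise' in pattern_lower:
--         return 'elementwise'
--
--     # Reshape/view operations
--     if any(op in pattern_lower for op in ['reshape', 'view', 'flatten', 'squeeze', 'unsqueeze']):
--         return 'reshape'
--
--     # Unfused or unknown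
--     if 'unfused' in pattern_lower:
--         return 'unfused'
--
--     return 'generic'
-- ===== SOURCE B (Python) =====
-- # Single-pass window scan: slide over the lowered pattern once, hashing every
-- # window against a keyword->flag dict to collect a set of feature flags, then
-- # decide the label from the flag set (no per-keyword substring searches).
-- KEYWORD_FLAGS = {
--     'depthwise': 'dw', 'dw': 'dw',
--     'mbconv': 'mb', 'inverted': 'mb',
--     'conv2d': 'conv', 'conv': 'conv',
--     'batchnorm': 'bnorm', 'bn': 'bn',
--     'matmul': 'mm', 'linear': 'mm', 'attention': 'mm',
--     'pool': 'pool',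
--     'layernorm': 'lnorm', 'layer_norm': 'lnorm',
--     'relu': 'act', 'gelu': 'act', 'silu': 'act', 'swish': 'act', 'sigmoid': 'act',
--     'add': 'ew', 'mul': 'ew', 'elementwise': 'ew',
--     'reshape': 'rs', 'view': 'rs', 'flatten': 'rs', 'squeeze': 'rs', 'unsqueeze': 'rs',
--     'unfused': 'uf',
-- }
-- _LENGTHS = sorted({len(k) for k in KEYWORD_FLAGS})
--
--
-- def map_fusion_pattern_to_operation_type(fusion_pattern: str) -> str:
--     p = fusion_pattern.lower()
--     found = set()
--     for i in range(len(p)):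
--         for L in _LENGTHS:
--             f = KEYWORD_FLAGS.get(p[i:i + L])
--             if f is not None:
--                 found.add(f)
--     if 'dw' in found:
--         return 'conv2d_depthwise'
--     if 'mb' in found:
--         return 'mbconv'
--     if 'conv' in found:
--         return 'conv2d_batchnorm' if ('bnorm' in found or 'bn' in found) else 'conv2d'
--     if 'mm' in found:
--         return 'matmul'
--     if 'pool' in found:
--         return 'pooling'
--     if 'lnorm' in found:
--         return 'layernorm'
--     if 'bnorm' in found:
--         return 'batchnorm'
--     if 'act' in found:
--         return 'activation'
--     if 'ew' in found:
--         return 'elementwise'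
--     if 'rs' in found:
--         return 'reshape'
--     if 'uf' in found:
--         return 'unfused'
--     return 'generic'
-- ===== Notes on version B (the rewrite author's own statement) =====
-- stated objective: alternative
-- what changed: Instead of A's cascade of per-keyword substring searches, B makes a single sliding-window pass over the lowered pattern, hashing every window against a keyword-to-flag dict to collect a set of feature flags, and then decides the label purely from that flag set.
import Mathlib
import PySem

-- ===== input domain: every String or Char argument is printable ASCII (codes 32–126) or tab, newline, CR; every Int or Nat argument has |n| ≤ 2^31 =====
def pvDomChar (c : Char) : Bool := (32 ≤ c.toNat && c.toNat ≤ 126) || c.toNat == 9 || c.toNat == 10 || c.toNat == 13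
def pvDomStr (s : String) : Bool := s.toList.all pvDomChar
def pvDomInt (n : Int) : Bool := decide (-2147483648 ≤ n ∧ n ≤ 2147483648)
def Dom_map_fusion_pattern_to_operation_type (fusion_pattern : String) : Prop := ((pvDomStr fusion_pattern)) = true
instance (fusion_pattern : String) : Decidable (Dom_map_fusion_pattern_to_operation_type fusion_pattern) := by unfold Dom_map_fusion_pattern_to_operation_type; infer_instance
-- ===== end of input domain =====

-- B replaces A's cascade of per-keyword substring searches by one sliding-window pass
-- hashing each window in a keyword→flag dict into a flag set, then a pure decision on
-- that set (alternative algorithm; same observable results).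

-- ===== PORT A =====
def map_fusion_pattern_to_operation_type (fusion_pattern : String) : String :=
  let pattern_lower := PySem.Str.lower fusion_pattern
  if PySem.Str.isIn "depthwise" pattern_lower || PySem.Str.isIn "dw" pattern_lower then
    "conv2d_depthwise"
  else if PySem.Str.isIn "mbconv" pattern_lower || PySem.Str.isIn "inverted" pattern_lower then
    "mbconv"
  else if PySem.Str.isIn "conv2d" pattern_lower || PySem.Str.isIn "conv" pattern_lower then
    (if PySem.Str.isIn "batchnorm" pattern_lower || PySem.Str.isIn "bn" pattern_lower then
      "conv2d_batchnorm"
    else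
      "conv2d")
  else if PySem.Str.isIn "matmul" pattern_lower || PySem.Str.isIn "linear" pattern_lower || PySem.Str.isIn "attention" pattern_lower then
    "matmul"
  else if PySem.Str.isIn "pool" pattern_lower then
    "pooling"
  else if PySem.Str.isIn "layernorm" pattern_lower || PySem.Str.isIn "layer_norm" pattern_lower then
    "layernorm"
  else if PySem.Str.isIn "batchnorm" pattern_lower then
    "batchnorm"
  else if (["relu", "gelu", "silu", "swish", "sigmoid"] : List String).any (fun act => PySem.Str.isIn act pattern_lower) then
    "activation"
  else if PySem.Str.isIn "add" pattern_lower || PySem.Str.isIn "mul" pattern_lower || PySem.Str.isIn "elementwise" pattern_lower then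
    "elementwise"
  else if (["reshape", "view", "flatten", "squeeze", "unsqueeze"] : List String).any (fun op => PySem.Str.isIn op pattern_lower) then
    "reshape"
  else if PySem.Str.isIn "unfused" pattern_lower then
    "unfused"
  else
    "generic"

-- ===== PORT B =====
-- KEYWORD_FLAGS: the keyword → flag dict of Source B (insertion order preserved)
def pvFlagPairs : List (String × String) :=
  [ ("depthwise", "dw"), ("dw", "dw")
  , ("mbconv", "mb"), ("inverted", "mb")
  , ("conv2d", "conv"), ("conv", "conv")
  , ("batchnorm", "bnorm"), ("bn", "bn")
  , ("matmul", "mm"), ("linear", "mm"), ("attention", "mm")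
  , ("pool", "pool")
  , ("layernorm", "lnorm"), ("layer_norm", "lnorm")
  , ("relu", "act"), ("gelu", "act"), ("silu", "act"), ("swish", "act"), ("sigmoid", "act")
  , ("add", "ew"), ("mul", "ew"), ("elementwise", "ew")
  , ("reshape", "rs"), ("view", "rs"), ("flatten", "rs"), ("squeeze", "rs"), ("unsqueeze", "rs")
  , ("unfused", "uf") ]

def pvFlagDict : PySem.Dict String String := PySem.Dict.ofList pvFlagPairs

-- _LENGTHS = sorted({len(k) for k in KEYWORD_FLAGS})
def pvLengths : List Nat :=
  PySem.List.sorted (PySem.Set.ofList (pvFlagPairs.map (fun kv => kv.1.toList.length))) (fun x => x) false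

-- the scanning loop: for i in range(len(p)): for L in _LENGTHS: f = KEYWORD_FLAGS.get(p[i:i+L]); if f is not None: found.add(f)
def pvFound (p : String) : PySem.Set String :=
  (List.range p.toList.length).foldl (fun found (i : Nat) =>
    pvLengths.foldl (fun found (L : Nat) =>
      match pvFlagDict.get? (PySem.Str.slice p (some (i : Int)) (some ((i : Int) + (L : Int)))) with
      | some f => PySem.Set.add found f
      | none => found) found) PySem.Set.empty

-- the decision on the flag set
def pvDecide (found : PySem.Set String) : String :=
  if PySem.Set.contains found "dw" then "conv2d_depthwise"
  else if PySem.Set.contains found "mb" then "mbconv"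
  else if PySem.Set.contains found "conv" then
    (if PySem.Set.contains found "bnorm" || PySem.Set.contains found "bn" then "conv2d_batchnorm"
     else "conv2d")
  else if PySem.Set.contains found "mm" then "matmul"
  else if PySem.Set.contains found "pool" then "pooling"
  else if PySem.Set.contains found "lnorm" then "layernorm"
  else if PySem.Set.contains found "bnorm" then "batchnorm"
  else if PySem.Set.contains found "act" then "activation"
  else if PySem.Set.contains found "ew" then "elementwise"
  else if PySem.Set.contains found "rs" then "reshape"
  else if PySem.Set.contains found "uf" then "unfused"
  else "generic"

def map_fusion_pattern_to_operation_type_alt (fusion_pattern : String) : String :=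
  pvDecide (pvFound (PySem.Str.lower fusion_pattern))

-- ===== PRECONDITION & SPEC =====
def Spec_map_fusion_pattern_to_operation_type (fusion_pattern : String) (out : String) : Prop := out = map_fusion_pattern_to_operation_type_alt fusion_pattern
instance (fusion_pattern : String) (out : String) : Decidable (Spec_map_fusion_pattern_to_operation_type fusion_pattern out) := by unfold Spec_map_fusion_pattern_to_operation_type; infer_instance

-- ===== CLAIM =====
def Claim_equal_map_fusion_pattern_to_operation_type : Prop := ∀ (fusion_pattern : String), Dom_map_fusion_pattern_to_operation_type fusion_pattern → Spec_map_fusion_pattern_to_operation_type fusion_pattern (map_fusion_pattern_to_operation_type fusion_pattern)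

-- ===== LEMMAS AND PROOFS =====

-- generic: membership in a fold adding `g a` when defined
theorem pv_mem_foldl_addOpt {α : Type} (g : α → Option String) (l : List α)
    (s0 : PySem.Set String) (f : String) :
    f ∈ l.foldl (fun s a => match g a with
        | some x => PySem.Set.add s x
        | none => s) s0 ↔ f ∈ s0 ∨ ∃ a ∈ l, g a = some f := by
  induction l generalizing s0 with
  | nil => simp
  | cons a l ih =>
    simp only [List.foldl_cons, List.mem_cons]
    cases h : g a with
    | none =>
      rw [ih]
      constructor
      · rintro (hs | ⟨b, hb, hgb⟩)
        · exact Or.inl hs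
        · exact Or.inr ⟨b, Or.inr hb, hgb⟩
      · rintro (hs | ⟨b, (rfl | hb), hgb⟩)
        · exact Or.inl hs
        · simp [h] at hgb
        · exact Or.inr ⟨b, hb, hgb⟩
    | some x =>
      rw [ih]
      simp only [PySem.Set.mem_add]
      constructor
      · rintro ((hs | rfl) | ⟨b, hb, hgb⟩)
        · exact Or.inl hs
        · exact Or.inr ⟨a, Or.inl rfl, h⟩
        · exact Or.inr ⟨b, Or.inr hb, hgb⟩
      · rintro (hs | ⟨b, (rfl | hb), hgb⟩)
        · exact Or.inl (Or.inl hs)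
        · rw [h] at hgb
          exact Or.inl (Or.inr (Option.some_injective _ hgb).symm)
        · exact Or.inr ⟨b, hb, hgb⟩

-- the nested scanning loop, over an arbitrary list of positions and start set
theorem pv_outer_mem (p : String) (l : List Nat) (s0 : PySem.Set String) (f : String) :
    f ∈ l.foldl (fun found (i : Nat) =>
        pvLengths.foldl (fun found (L : Nat) =>
          match pvFlagDict.get? (PySem.Str.slice p (some (i : Int)) (some ((i : Int) + (L : Int)))) with
          | some f => PySem.Set.add found f
          | none => found) found) s0 ↔
      f ∈ s0 ∨ ∃ i ∈ l, ∃ L ∈ pvLengths,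
        pvFlagDict.get? (PySem.Str.slice p (some (i : Int)) (some ((i : Int) + (L : Int)))) = some f := by
  induction l generalizing s0 with
  | nil => simp
  | cons i l ih =>
    simp only [List.foldl_cons, List.mem_cons]
    rw [ih, pv_mem_foldl_addOpt]
    constructor
    · rintro ((hs | ⟨L, hL, hg⟩) | ⟨j, hj, L, hL, hg⟩)
      · exact Or.inl hs
      · exact Or.inr ⟨i, Or.inl rfl, L, hL, hg⟩
      · exact Or.inr ⟨j, Or.inr hj, L, hL, hg⟩
    · rintro (hs | ⟨j, (rfl | hj), L, hL, hg⟩)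
      · exact Or.inl (Or.inl hs)
      · exact Or.inl (Or.inr ⟨L, hL, hg⟩)
      · exact Or.inr ⟨j, hj, L, hL, hg⟩

-- closed facts about the literal tables (all by computation)
theorem pv_items_eq : pvFlagDict.items = pvFlagPairs := by decide
theorem pv_keys_nonempty : ∀ kv ∈ pvFlagPairs, kv.1.toList ≠ [] := by decide
theorem pv_len_mem : ∀ kv ∈ pvFlagPairs, kv.1.toList.length ∈ pvLengths := by decide
theorem pv_get_self : ∀ kv ∈ pvFlagPairs, pvFlagDict.get? kv.1 = some kv.2 := by decide

theorem pv_str_ext {s t : String} (h : s.toList = t.toList) : s = t :=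
  String.toList_inj.mp h

-- membership in the collected flag set = some keyword with that flag occurs in p
theorem pv_mem_found (p : String) (f : String) :
    f ∈ pvFound p ↔ ∃ kv ∈ pvFlagPairs, kv.2 = f ∧ PySem.Str.isIn kv.1 p = true := by
  unfold pvFound
  rw [pv_outer_mem]
  simp only [PySem.Set.empty, List.not_mem_nil, false_or, List.mem_range]
  constructor
  · rintro ⟨i, _, L, _, hg⟩
    refine ⟨(PySem.Str.slice p (some (i : Int)) (some ((i : Int) + (L : Int))), f),
      ?_, rfl, ?_⟩
    · have := PySem.Dict.mem_items_of_get?_eq_some pvFlagDict hg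
      rwa [pv_items_eq] at this
    · rw [PySem.Str.isIn_iff_infix, PySem.Str.toList_slice, PySem.Chars.slice_eq_listSlice,
        PySem.List.slice_natCast_add]
      exact ((List.take_prefix _ _).isInfix.trans (List.drop_suffix _ _).isInfix)
  · rintro ⟨kv, hkv, rfl, hin⟩
    rw [PySem.Str.isIn_iff_infix] at hin
    obtain ⟨t, hpre, hsuf⟩ := List.infix_iff_prefix_suffix.mp hin
    obtain ⟨j, rfl⟩ : ∃ j, t = p.toList.drop j := by
      obtain ⟨u, hu⟩ := hsuf
      exact ⟨u.length, by rw [← hu, List.drop_left]⟩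
    have hjlt : j < p.toList.length := by
      by_contra hge
      rw [List.drop_eq_nil_of_le (le_of_not_gt hge)] at hpre
      have hne := pv_keys_nonempty kv hkv
      have hle := hpre.length_le
      simp only [List.length_nil, Nat.le_zero] at hle
      exact hne (List.length_eq_zero_iff.mp hle)
    refine ⟨j, hjlt, kv.1.toList.length, pv_len_mem kv hkv, ?_⟩
    have hslice : PySem.Str.slice p (some (j : Int)) (some ((j : Int) + (kv.1.toList.length : Int))) = kv.1 := by
      apply pv_str_ext
      rw [PySem.Str.toList_slice, PySem.Chars.slice_eq_listSlice, PySem.List.slice_natCast_add]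
      exact (List.prefix_iff_eq_take.mp hpre).symm
    rw [hslice]
    exact pv_get_self kv hkv

-- per-flag Bool characterizations
theorem pv_contains_eq (p : String) (f : String) :
    PySem.Set.contains (pvFound p) f =
      pvFlagPairs.any (fun kv => kv.2 == f && PySem.Str.isIn kv.1 p) := by
  rw [Bool.eq_iff_iff, PySem.Set.contains_iff, pv_mem_found, List.any_eq_true]
  constructor
  · rintro ⟨kv, hkv, rfl, hin⟩
    exact ⟨kv, hkv, by simpa using hin⟩
  · rintro ⟨kv, hkv, h⟩
    rw [Bool.and_eq_true, beq_iff_eq] at h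
    exact ⟨kv, hkv, h.1, h.2⟩

-- ===== VERDICT =====
theorem map_fusion_pattern_to_operation_type_spec : Claim_equal_map_fusion_pattern_to_operation_type := by
  intro s _
  unfold Spec_map_fusion_pattern_to_operation_type map_fusion_pattern_to_operation_type
    map_fusion_pattern_to_operation_type_alt pvDecide
  simp only [pv_contains_eq, pvFlagPairs, List.any_cons, List.any_nil]
  simp [or_assoc]
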